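-- pv_equiv track=rewrite | github.com/Parv09955/IS_Project | qr_generator.py | create_letter_matrix
-- ===== SOURCE A (Python) =====
-- def create_blank_matrix(rows, columns):
--     matrix = []
--     for i in range(rows):
--         row = [" "] * columns
--         matrix.append(row)
--     return matrix
--
-- def create_letter_matrix(rows, columns, text):
--     n = len(text)
--     matrix = create_blank_matrix(rows, columns)
--     count = 0
--     for i in range(rows):
--         for j in range(columns):
--             if count >= n:
--                 matrix[i][j] = "~"
--             else:
--                 matrix[i][j] = text[count]
--             count += 1
--     return matrix
-- ===== SOURCE B (Python) =====
-- def create_letter_matrix(rows, columns, text):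
--     c = max(columns, 0)
--     total = max(rows, 0) * c
--     pad = text[:total] + "~" * (total - len(text))
--     return [list(pad[i * c:(i + 1) * c]) for i in range(rows)]
-- ===== Notes on version B (the rewrite author's own statement) =====
-- stated objective: simpler
-- what changed: A fills a pre-built blank matrix cell by cell with a nested loop and a running count; B first builds the whole padded content string (text truncated to rows*columns, padded with '~') and then reshapes it into rows by slicing.
import Mathlib
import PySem

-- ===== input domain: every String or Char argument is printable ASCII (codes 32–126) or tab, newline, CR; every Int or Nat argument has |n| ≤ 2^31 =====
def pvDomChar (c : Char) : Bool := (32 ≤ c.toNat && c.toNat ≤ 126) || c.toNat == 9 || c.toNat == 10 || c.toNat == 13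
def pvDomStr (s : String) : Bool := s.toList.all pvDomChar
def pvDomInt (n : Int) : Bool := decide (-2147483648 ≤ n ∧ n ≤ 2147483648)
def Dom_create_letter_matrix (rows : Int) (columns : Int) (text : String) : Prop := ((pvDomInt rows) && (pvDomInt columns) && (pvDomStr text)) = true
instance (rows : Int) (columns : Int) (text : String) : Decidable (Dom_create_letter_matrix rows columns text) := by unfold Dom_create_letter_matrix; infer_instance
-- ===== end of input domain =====

-- B replaces A's per-cell nested fill loop with a compute-then-reshape pass (pad the text, then chunk it into rows); objective: simpler.


-- ===== PORT A =====
def create_blank_matrix (rows : Int) (columns : Int) : List (List String) :=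
  (PySem.List.pyRange 0 rows 1).foldl
    (fun matrix _i => matrix ++ [List.replicate columns.toNat " "]) []

def create_letter_matrix (rows : Int) (columns : Int) (text : String) : List (List String) :=
  let n := PySem.Str.len text
  let matrix := create_blank_matrix rows columns
  let final := (PySem.List.pyRange 0 rows 1).foldl
    (fun (st : List (List String) × Int) i =>
      (PySem.List.pyRange 0 columns 1).foldl
        (fun (st : List (List String) × Int) j =>
          let v : String :=
            if st.2 ≥ n then "~"
            else (PySem.Str.pyGet? text st.2).elim "~" (fun ch => String.ofList [ch])
          (PySem.List.pySetD st.1 i (PySem.List.pySetD (PySem.List.pyGetD st.1 i []) j v), st.2 + 1))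
        st)
    (matrix, 0)
  final.1

-- ===== PORT B =====
def create_letter_matrix_alt (rows : Int) (columns : Int) (text : String) : List (List String) :=
  let c : Int := max columns 0
  let total : Int := max rows 0 * c
  let pad : List Char :=
    PySem.List.slice text.toList none (some total)
      ++ List.replicate (total - PySem.Str.len text).toNat '~'
  (PySem.List.pyRange 0 rows 1).map
    (fun i => (PySem.List.slice pad (some (i * c)) (some ((i + 1) * c))).map
      (fun ch => String.ofList [ch]))

-- ===== PRECONDITION & SPEC =====
def Spec_create_letter_matrix (rows : Int) (columns : Int) (text : String) (out : List (List String)) : Prop := out = create_letter_matrix_alt rows columns text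
instance (rows : Int) (columns : Int) (text : String) (out : List (List String)) : Decidable (Spec_create_letter_matrix rows columns text out) := by unfold Spec_create_letter_matrix; infer_instance

-- ===== CLAIM (what is proved, stated in full; the proofs are below) =====
def Claim_equal_create_letter_matrix : Prop := ∀ (rows : Int) (columns : Int) (text : String), Dom_create_letter_matrix rows columns text → Spec_create_letter_matrix rows columns text (create_letter_matrix rows columns text)

-- ===== LEMMAS AND PROOFS =====

-- the value A writes at running count c (as a function of the count)
def pvVal (text : String) (c : Int) : String :=
  if c ≥ PySem.Str.len text then "~"
  else (PySem.Str.pyGet? text c).elim "~" (fun ch => String.ofList [ch])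

-- row i of the common normal form
def pvRow (text : String) (C i : Nat) : List String :=
  (List.range C).map (fun (j : Nat) => pvVal text ((i * C + j : Nat) : Int))

-- filling a row left to right with set, carrying the count
lemma pv_fill_row (v : Int → String) :
    ∀ (C : Nat) (r : List String) (c0 : Int), C ≤ r.length →
    (List.range C).foldl (fun (st : List String × Int) k => (st.1.set k (v st.2), st.2 + 1)) (r, c0)
      = ((List.range C).map (fun (k : Nat) => v (c0 + (k : Int))) ++ r.drop C, c0 + C) := by
  intro C
  induction C with
  | zero => intro r c0 _; simp
  | succ C ih =>
    intro r c0 h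
    rw [List.range_succ, List.foldl_append, ih r c0 (by omega)]
    simp only [List.foldl_cons, List.foldl_nil, Prod.mk.injEq]
    have hlen : (List.map (fun (k : Nat) => v (c0 + (k : Int))) (List.range C)).length = C := by simp
    constructor
    · rw [List.set_append_right _ _ (by omega), hlen, Nat.sub_self,
        List.drop_eq_getElem_cons (by omega : C < r.length), List.set_cons_zero,
        List.map_append]
      simp
    · push_cast; ring

-- lifting a row-fill through the matrix-level set/get at a fixed row index
lemma pv_fill_mat (v : Int → String) (i : Nat) :
    ∀ (ks : List Nat) (m : List (List String)) (c0 : Int), i < m.length →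
    ks.foldl (fun (st : List (List String) × Int) k =>
        (st.1.set i ((st.1.getD i []).set k (v st.2)), st.2 + 1)) (m, c0)
      = (m.set i ((ks.foldl (fun (st : List String × Int) k => (st.1.set k (v st.2), st.2 + 1)) (m.getD i [], c0)).1),
         (ks.foldl (fun (st : List String × Int) k => (st.1.set k (v st.2), st.2 + 1)) (m.getD i [], c0)).2) := by
  intro ks
  induction ks with
  | nil =>
    intro m c0 h
    rw [List.getD_eq_getElem m [] h]; simp [List.set_getElem_self]
  | cons k ks ih =>
    intro m c0 h
    simp only [List.foldl_cons]
    rw [ih (m.set i ((m.getD i []).set k (v c0))) (c0 + 1) (by simpa using h)]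
    have hg : ((m.set i ((m.getD i []).set k (v c0))).getD i []) = (m.getD i []).set k (v c0) := by
      rw [List.getD_eq_getElem _ [] (by simpa using h), List.getElem_set_self]
    rw [hg, List.set_set]

-- the outer loop, processed row by row
lemma pv_outer (v : Int → String) (C : Nat) :
    ∀ (R' R : Nat), R' ≤ R →
    (List.range R').foldl
        (fun (st : List (List String) × Int) i =>
          (List.range C).foldl
            (fun (st : List (List String) × Int) k =>
              (st.1.set i ((st.1.getD i []).set k (v st.2)), st.2 + 1)) st)
        (List.replicate R (List.replicate C " "), 0)
      = ((List.range R').map (fun (i : Nat) => (List.range C).map (fun (j : Nat) => v ((i * C + j : Nat) : Int)))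
           ++ List.replicate (R - R') (List.replicate C " "),
         ((R' * C : Nat) : Int)) := by
  intro R'
  induction R' with
  | zero => intro R _; simp
  | succ R' ih =>
    intro R h
    rw [List.range_succ, List.foldl_append, ih R (by omega), List.foldl_cons, List.foldl_nil]
    set row : Nat → List String := fun (i : Nat) => (List.range C).map (fun (j : Nat) => v ((i * C + j : Nat) : Int)) with hrowdef
    have hlen : ((List.range R').map row).length = R' := by simp
    have hmlen : R' < (((List.range R').map row) ++ List.replicate (R - R') (List.replicate C " ")).length := by
      simp; omega
    rw [pv_fill_mat v R' (List.range C) _ _ hmlen]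
    have hget : ((((List.range R').map row) ++ List.replicate (R - R') (List.replicate C " ")).getD R' [])
        = List.replicate C " " := by
      rw [List.getD_eq_getElem _ [] hmlen, List.getElem_append_right (by omega)]
      simp [hlen]
    rw [hget, pv_fill_row v C (List.replicate C " ") _ (by simp)]
    simp only [Prod.mk.injEq]
    constructor
    · rw [List.drop_replicate]
      simp only [Nat.sub_self, List.replicate_zero, List.append_nil]
      have hrow : (List.range C).map (fun (k : Nat) => v (((R' * C : Nat) : Int) + (k : Int)))
          = row R' := by
        rw [hrowdef]; apply List.map_congr_left; intro k _; congr 1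
      rw [hrow, List.set_append_right _ _ (by omega), hlen, Nat.sub_self]
      have hrep : List.replicate (R - R') (List.replicate C " ") = (List.replicate C " ") :: List.replicate (R - R' - 1) (List.replicate C " ") := by
        rw [← List.replicate_succ]; congr 1; omega
      rw [hrep, List.set_cons_zero, List.map_append]
      simp only [List.map_cons, List.map_nil, List.append_assoc, List.singleton_append]
      congr 3
    · push_cast; ring

-- reading one chunk of the padded text is one row of values
lemma pv_chunk (text : String) (N s C : Nat) (h : s + C ≤ N) :
    ((((text.toList.take N ++ List.replicate (N - text.toList.length) '~').drop s).take C).map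
        (fun ch => String.ofList [ch]))
      = (List.range C).map (fun (j : Nat) => pvVal text ((s + j : Nat) : Int)) := by
  set L := text.toList with hL
  apply List.ext_getElem
  · simp; omega
  · intro j hj1 hj2
    have hjC : j < C := by simpa using hj2
    simp only [List.getElem_map, List.getElem_take, List.getElem_drop, List.getElem_range]
    rw [pvVal]
    by_cases hlt : s + j < L.length
    · have hge : ¬ (((s + j : Nat) : Int) ≥ PySem.Str.len text) := by
        rw [PySem.Str.len_eq, ← hL]; push_cast; omega
      rw [if_neg hge]
      rw [show PySem.Str.pyGet? text ((s + j : Nat) : Int) = L[s + j]? from by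
        rw [PySem.Str.pyGet?_natCast, ← hL]]
      rw [List.getElem?_eq_getElem hlt]
      simp only [Option.elim_some]
      congr 1
      rw [List.getElem_append_left (by simp [List.length_take]; omega)]
      rw [List.getElem_take]
    · have hge : (((s + j : Nat) : Int) ≥ PySem.Str.len text) := by
        rw [PySem.Str.len_eq, ← hL]; push_cast; omega
      rw [if_pos hge]
      rw [List.getElem_append_right (by simp [List.length_take]; omega)]
      simp [List.getElem_replicate]

lemma pv_A_normal (rows columns : Int) (text : String) :
    create_letter_matrix rows columns text
      = (List.range rows.toNat).map (pvRow text columns.toNat) := by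
  have hblank : create_blank_matrix rows columns
      = List.replicate rows.toNat (List.replicate columns.toNat " ") := by
    unfold create_blank_matrix
    rw [PySem.List.foldl_append_singleton_eq_map]
    simp [PySem.List.pyRange_zero, Function.comp_def]
  unfold create_letter_matrix
  rw [hblank]
  simp only [PySem.List.pyRange_zero, List.foldl_map, PySem.List.pySetD_natCast,
    PySem.List.pyGetD_natCast]
  rw [pv_outer (fun c => if c ≥ PySem.Str.len text then "~"
      else (PySem.Str.pyGet? text c).elim "~" (fun ch => String.ofList [ch]))
    columns.toNat rows.toNat rows.toNat le_rfl]
  simp [pvRow, pvVal]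

lemma pv_B_normal (rows columns : Int) (text : String) :
    create_letter_matrix_alt rows columns text
      = (List.range rows.toNat).map (pvRow text columns.toNat) := by
  unfold create_letter_matrix_alt
  dsimp only
  set R := rows.toNat with hR
  set C := columns.toNat with hC
  rw [(Int.toNat_eq_max columns).symm, (Int.toNat_eq_max rows).symm, PySem.Str.len_eq]
  rw [show (R : Int) * (C : Int) = ((R * C : Nat) : Int) from by push_cast; ring]
  rw [PySem.List.slice_to_natCast, Int.toNat_sub]
  rw [PySem.List.pyRange_zero, List.map_map]
  apply List.map_congr_left
  intro i hi
  have hiR : i < R := List.mem_range.mp hi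
  simp only [Function.comp_apply]
  rw [show (i : Int) * (C : Int) = ((i * C : Nat) : Int) from by push_cast; ring,
    show ((i : Int) + 1) * (C : Int) = (((i + 1) * C : Nat) : Int) from by push_cast; ring,
    PySem.List.slice_natCast,
    show (i + 1) * C - i * C = C from by rw [Nat.succ_mul]; omega]
  have hbound : i * C + C ≤ R * C := by
    have h1 := Nat.mul_le_mul_right C (show i + 1 ≤ R by omega)
    rw [Nat.succ_mul] at h1
    exact h1
  rw [pv_chunk text (R * C) (i * C) C hbound]
  rfl

-- ===== VERDICT (by name: the statement is the Claim_ definition above) =====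
theorem create_letter_matrix_spec : Claim_equal_create_letter_matrix := by
  intro rows columns text _
  unfold Spec_create_letter_matrix
  rw [pv_A_normal, pv_B_normal]
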